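-- pv_equiv track=rewrite | github.com/aman0456/Networks-Lab-Communication-Protcol | src/encode.py | generate
-- ===== SOURCE A (Python) =====
-- def generate(s, modulo):
-- 	l = len(s)
-- 	ans = [0]*modulo
-- 	for start in range(modulo):
-- 		i = start
-- 		while i < l:
-- 			if s[i]=='1':
-- 				ans[start] += 1
-- 			i+=modulo
-- 		ans[start] = ans[start]%2
-- 		ans[start] = chr(48+ans[start])
-- 	return ans
-- ===== SOURCE B (Python) =====
-- def generate(s, modulo):
--     if modulo <= 0:
--         return []
--     ans = [0] * modulo
--     for i, ch in enumerate(s):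
--         if ch == '1':
--             ans[i % modulo] ^= 1
--     return [chr(48 + v) for v in ans]
-- ===== Notes on version B (the rewrite author's own statement) =====
-- stated objective: faster
-- what changed: Replaces the nested residue/stride loop (one pass over the string per residue class) with a single linear pass that toggles a parity bit per residue class i % modulo, then renders the digits.
import Mathlib
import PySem

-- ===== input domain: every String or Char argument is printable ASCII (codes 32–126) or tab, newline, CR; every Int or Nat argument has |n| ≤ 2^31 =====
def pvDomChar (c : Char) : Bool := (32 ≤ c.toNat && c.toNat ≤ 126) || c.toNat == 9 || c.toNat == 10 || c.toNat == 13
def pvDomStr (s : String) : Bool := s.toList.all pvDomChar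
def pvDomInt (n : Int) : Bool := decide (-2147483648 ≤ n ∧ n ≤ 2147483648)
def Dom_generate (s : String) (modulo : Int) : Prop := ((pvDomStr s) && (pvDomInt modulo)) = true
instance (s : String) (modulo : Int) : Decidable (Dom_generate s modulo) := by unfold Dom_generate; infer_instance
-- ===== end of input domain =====

-- B replaces A's nested residue/stride scan with a single linear pass over the string that
-- toggles one parity bit per residue class i % modulo (objective: constant-factor speedup).


-- ===== PORT A =====
-- ans = [0]*modulo and the for loop overwrites ans[start] (in order) for EVERY start in
-- range(modulo), so the loop is transcribed as a map over range(modulo).  The inner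
-- 'i = start; while i < l: …; i += modulo' iterates i over exactly range(start, l, modulo),
-- ported with PySem.List.pyRange (exact: the inner loop only runs for start ∈ range(modulo),
-- hence with modulo ≥ 1).
def generate (s : String) (modulo : Int) : List String :=
  let l : Int := PySem.Str.len s
  (PySem.List.pyRange 0 modulo 1).map (fun start =>
    let c : Int := (PySem.List.pyRange start l modulo).foldl
      (fun acc i => if PySem.Str.pyGet? s i = some '1' then acc + 1 else acc) 0
    String.mk [Char.ofNat (48 + PySem.Int.mod c 2).toNat])

-- ===== PORT B =====
def generate_alt (s : String) (modulo : Int) : List String :=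
  if modulo ≤ 0 then []
  else
    let ans : List Int :=
      (PySem.List.enumerate s.toList 0).foldl
        (fun a p =>
          if p.2 = '1' then
            a.set (PySem.Int.mod p.1 modulo).toNat
              (PySem.Int.bxor (a.getD (PySem.Int.mod p.1 modulo).toNat 0) 1)
          else a)
        (List.replicate modulo.toNat 0)
    ans.map (fun v => String.mk [Char.ofNat (48 + v).toNat])

-- ===== PRECONDITION & SPEC =====
def Spec_generate (s : String) (modulo : Int) (out : List String) : Prop := out = generate_alt s modulo
instance (s : String) (modulo : Int) (out : List String) : Decidable (Spec_generate s modulo out) := by unfold Spec_generate; infer_instance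

-- ===== CLAIM (what is proved, stated in full; the proofs are below) =====
def Claim_equal_generate : Prop := ∀ (s : String) (modulo : Int), Dom_generate s modulo → Spec_generate s modulo (generate s modulo)

-- ===== LEMMAS AND PROOFS =====

-- number of '1' characters of cs at indices ≡ K (mod M)
def cntk (cs : List Char) (M K : Nat) : Nat :=
  (List.range cs.length).countP (fun i => i % M == K && cs.getD i ' ' == '1')

theorem mod_eq_iff_dvd (x : Int) {m k : Int} (hm : 0 < m) (hk0 : 0 ≤ k) (hk : k < m) :
    PySem.Int.mod x m = k ↔ m ∣ x - k := by
  have hdecomp := PySem.Int.floordiv_mul_add_mod x m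
  have h0 := PySem.Int.mod_nonneg x hm
  have h1 := PySem.Int.mod_lt x hm
  constructor
  · intro h
    refine ⟨PySem.Int.floordiv x m, ?_⟩
    rw [← h]; linear_combination - hdecomp
  · rintro ⟨q, hq⟩
    have hd : PySem.Int.mod x m - k = m * (q - PySem.Int.floordiv x m) := by
      linear_combination hq + hdecomp
    have he : q - PySem.Int.floordiv x m = 0 := by
      set e := q - PySem.Int.floordiv x m with hedef
      rcases lt_trichotomy e 0 with hlt | heq | hgt
      · nlinarith [hd, mul_le_mul_of_nonneg_left (show e ≤ -1 by omega) (show (0:Int) ≤ m by omega)]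
      · exact heq
      · nlinarith [hd, mul_le_mul_of_nonneg_left (show 1 ≤ e by omega) (show (0:Int) ≤ m by omega)]
    rw [he, mul_zero] at hd; omega

-- A's stride count over range(K, len, M) = the '1'-count of the residue class K
theorem countA (cs : List Char) (M K : Nat) (hM : 0 < M) (hK : K < M) :
    (PySem.List.pyRange (K : Int) (cs.length : Int) (M : Int)).countP
      (fun i => decide (PySem.Chars.pyGet? cs i = some '1')) = cntk cs M K := by
  have hMi : (0:Int) < (M:Int) := by exact_mod_cast hM
  have hnd1 : (PySem.List.pyRange (K:Int) (cs.length:Int) (M:Int)).Nodup := by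
    rw [PySem.List.pyRange_of_pos _ _ hMi]
    refine (List.nodup_range).map ?_
    intro a b hab
    have h2 : (M:Int) * a = (M:Int) * b := by linear_combination hab
    have h3 := mul_left_cancel₀ (show (M:Int) ≠ 0 by omega) h2
    exact_mod_cast h3
  have hnd2 : ((PySem.List.pyRange 0 (cs.length:Int) 1).filter
      (fun i => PySem.Int.mod i (M:Int) == (K:Int))).Nodup :=
    (PySem.List.nodup_pyRange_one _ _).filter _
  have hperm : (PySem.List.pyRange (K:Int) (cs.length:Int) (M:Int)).Perm
      ((PySem.List.pyRange 0 (cs.length:Int) 1).filter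
        (fun i => PySem.Int.mod i (M:Int) == (K:Int))) := by
    rw [List.perm_ext_iff_of_nodup hnd1 hnd2]
    intro x
    rw [List.mem_filter, PySem.List.mem_pyRange_iff_of_pos hMi, PySem.List.mem_pyRange_one]
    constructor
    · rintro ⟨h1, h2, h3⟩
      refine ⟨⟨by omega, h2⟩, ?_⟩
      simpa using (mod_eq_iff_dvd x (m := (M:Int)) (k := (K:Int)) hMi (Int.natCast_nonneg K)
        (by exact_mod_cast hK)).2 h3
    · rintro ⟨⟨h1, h2⟩, h3⟩
      have hdvd := (mod_eq_iff_dvd x (m := (M:Int)) (k := (K:Int)) hMi (Int.natCast_nonneg K)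
        (by exact_mod_cast hK)).1 (by simpa using h3)
      refine ⟨?_, h2, hdvd⟩
      obtain ⟨q, hq⟩ := hdvd
      rcases lt_or_ge q 0 with h | h
      swap
      · nlinarith
      · nlinarith [mul_le_mul_of_nonneg_left (show q ≤ -1 by omega) (show (0:Int) ≤ (M:Int) by omega)]
  rw [hperm.countP_eq, List.countP_filter, PySem.List.pyRange_zero_natCast, List.countP_map]
  unfold cntk
  apply List.countP_congr
  intro i hi
  rw [List.mem_range] at hi
  show (decide (PySem.Chars.pyGet? cs (i:Int) = some '1') && (PySem.Int.mod (i:Int) (M:Int) == (K:Int)))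
      = true ↔ (i % M == K && cs.getD i ' ' == '1') = true
  have hget : PySem.Chars.pyGet? cs (i:Int) = cs[i]? := by
    show PySem.List.pyGet? cs (i:Int) = cs[i]?
    simp
  rw [hget, PySem.Int.mod_natCast, List.getElem?_eq_getElem hi]
  have hgd : cs.getD i ' ' = cs[i] := List.getD_eq_getElem cs ' ' hi
  rw [hgd]
  simp [Bool.and_comm]
  intro _
  omega

theorem set_map_range (f : Nat → Int) (M j : Nat) (v : Int) :
    ((List.range M).map f).set j v = (List.range M).map (fun k => if k = j then v else f k) := by
  apply List.ext_getElem
  · simp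
  · intro k h1 h2
    simp only [List.getElem_set, List.getElem_map, List.getElem_range]
    by_cases hk : k = j <;> simp [hk]
    intro h; exact absurd h.symm hk

theorem getD_map_range (f : Nat → Int) (M j : Nat) (hj : j < M) :
    ((List.range M).map f).getD j 0 = f j := by
  rw [List.getD_eq_getElem?_getD]
  simp [List.getElem?_map, List.getElem?_range hj]

theorem cntk_append (cs : List Char) (c : Char) (M K : Nat) :
    cntk (cs ++ [c]) M K
      = cntk cs M K + (if cs.length % M == K && c == '1' then 1 else 0) := by
  unfold cntk
  rw [List.length_append, List.length_singleton, List.range_succ, List.countP_append]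
  congr 1
  · apply List.countP_congr
    intro i hi
    rw [List.mem_range] at hi
    have : (cs ++ [c]).getD i ' ' = cs.getD i ' ' := List.getD_append cs [c] ' ' i hi
    rw [this]
  · have hg : (cs ++ [c]).getD cs.length ' ' = c := by
      rw [List.getD_eq_getElem?_getD]
      simp
    simp only [List.countP_cons, List.countP_nil, hg]
    by_cases h : cs.length % M == K && c == '1' <;> simp [h]

-- B's single pass maintains the parities of all residue classes
theorem foldB (cs : List Char) (M : Nat) (hM : 0 < M) :
    (PySem.List.enumerate cs 0).foldl
      (fun a p =>
        if p.2 = '1' then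
          a.set (PySem.Int.mod p.1 (M : Int)).toNat
            (PySem.Int.bxor (a.getD (PySem.Int.mod p.1 (M : Int)).toNat 0) 1)
        else a)
      (List.replicate M (0 : Int))
    = (List.range M).map (fun k => ((cntk cs M k % 2 : Nat) : Int)) := by
  induction cs using List.reverseRecOn with
  | nil =>
      simp [PySem.List.enumerate, cntk]
  | append_singleton cs c ih =>
      rw [PySem.List.enumerate_append, List.foldl_append, ih]
      simp only [PySem.List.enumerate, List.foldl_cons, List.foldl_nil]
      have hmodc : PySem.Int.mod ((0:Int) + (cs.length:Int)) (M:Int) = ((cs.length % M : Nat) : Int) := by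
        rw [zero_add, PySem.Int.mod_natCast]
      by_cases hc : c = '1'
      · rw [if_pos (by simpa using hc)]
        have hjm : cs.length % M < M := Nat.mod_lt _ hM
        rw [hmodc, Int.toNat_natCast]
        rw [getD_map_range _ _ _ hjm, set_map_range]
        apply List.map_congr_left
        intro k hk
        rw [List.mem_range] at hk
        rw [cntk_append]
        by_cases hkj : k = cs.length % M
        · rw [if_pos hkj, hkj]
          have hcond : (cs.length % M == cs.length % M && c == '1') = true := by simp [hc]
          rw [hcond, if_pos rfl]
          rcases Nat.mod_two_eq_zero_or_one (cntk cs M (cs.length % M)) with h2 | h2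
          · rw [h2, show (cntk cs M (cs.length % M) + 1) % 2 = 1 by omega]; decide
          · rw [h2, show (cntk cs M (cs.length % M) + 1) % 2 = 0 by omega]; decide
        · rw [if_neg hkj]
          have hcond : (cs.length % M == k) = false := beq_eq_false_iff_ne.2 (fun h => hkj h.symm)
          rw [hcond, Bool.false_and]
          simp
      · rw [if_neg (by simpa using hc)]
        apply List.map_congr_left
        intro k hk
        rw [cntk_append]
        rw [show (c == '1') = false from beq_eq_false_iff_ne.2 hc, Bool.and_false]
        simp

-- ===== VERDICT (by name: the statement is the Claim_ definition above) =====
theorem generate_spec : Claim_equal_generate := by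
  intro s modulo _hdom
  unfold Spec_generate generate generate_alt
  by_cases hm : modulo ≤ 0
  · rw [if_pos hm]
    rw [PySem.List.pyRange_one_eq_nil hm]
    rfl
  · rw [if_neg hm]
    have hm' : 0 < modulo := by omega
    obtain ⟨M, hM⟩ : ∃ M : Nat, modulo = (M : Int) :=
      ⟨modulo.toNat, (Int.toNat_of_nonneg (le_of_lt hm')).symm⟩
    subst hM
    have hM0 : 0 < M := by exact_mod_cast hm'
    simp only [Int.toNat_natCast]
    rw [foldB s.toList M hM0, PySem.Str.len_eq, PySem.List.pyRange_zero_natCast,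
        List.map_map, List.map_map]
    apply List.map_congr_left
    intro K hK
    rw [List.mem_range] at hK
    simp only [Function.comp]
    rw [PySem.List.foldl_ite_add_one (fun i => PySem.Str.pyGet? s i = some '1'), zero_add]
    have hcnt : (List.countP (fun x => decide (PySem.Str.pyGet? s x = some '1'))
        (PySem.List.pyRange (K:Int) ((s.toList.length : Int)) (M:Int))) = cntk s.toList M K :=
      countA s.toList M K hM0 hK
    rw [hcnt]
    have hmod2 : PySem.Int.mod ((cntk s.toList M K : Nat) : Int) 2
        = ((cntk s.toList M K % 2 : Nat) : Int) := by
      exact_mod_cast PySem.Int.mod_natCast (cntk s.toList M K) 2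
    rw [hmod2]
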